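-- pv_equiv track=rewrite | github.com/lumorphnetwork/code | parse_comms.py | get_node_id_matrix
-- ===== SOURCE A (Python) =====
-- def get_node_id_matrix(rows, cols):
--     node_id = 0
--     matrix = {}
--
--     for col in range(cols):
--         for row in range(rows):
--             if row not in matrix:
--                 matrix[row] = {}
--             if col not in matrix[row]:
--                 matrix[row][col] = {}
--             matrix[row][col] = node_id
--             node_id += 1
--
--     return matrix
-- ===== SOURCE B (Python) =====
-- def get_node_id_matrix(rows, cols):
--     # Different algorithm: materialise the flat id sequence 0..rows*cols-1 once,
--     # chunk it into column slices, transpose the columns with zip(*...), and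
--     # assemble the nested dict from the transposed rows.
--     if rows <= 0 or cols <= 0:
--         return {}
--     ids = list(range(rows * cols))
--     columns = [ids[c * rows:(c + 1) * rows] for c in range(cols)]
--     return {r: dict(enumerate(row_vals))
--             for r, row_vals in enumerate(zip(*columns))}
-- ===== Notes on version B (the rewrite author's own statement) =====
-- stated objective: alternative
-- what changed: Replaces A's stateful per-cell fill (running node_id counter plus membership-checked nested-dict mutation) with staged whole-structure passes: build the flat id list 0..rows*cols-1, slice it into column chunks, transpose the columns with zip(*...), and assemble the nested dict from the transposed rows.
import Mathlib
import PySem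

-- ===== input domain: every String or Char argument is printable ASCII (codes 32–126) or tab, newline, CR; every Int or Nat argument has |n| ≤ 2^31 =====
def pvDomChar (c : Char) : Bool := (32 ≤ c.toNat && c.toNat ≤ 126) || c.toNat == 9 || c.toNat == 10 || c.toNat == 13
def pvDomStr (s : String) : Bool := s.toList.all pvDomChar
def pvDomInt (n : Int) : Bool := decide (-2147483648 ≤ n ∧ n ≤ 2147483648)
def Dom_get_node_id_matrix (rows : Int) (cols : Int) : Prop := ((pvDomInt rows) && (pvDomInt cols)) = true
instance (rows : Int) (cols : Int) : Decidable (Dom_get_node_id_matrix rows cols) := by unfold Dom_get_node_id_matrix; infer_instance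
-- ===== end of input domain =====

-- B replaces A's stateful per-cell fill (running node_id counter plus membership-checked
-- nested-dict mutation) with staged whole-structure passes: flat id list, column slices,
-- zip-transpose, then assembly (objective: alternative; same return value, no speed claim).

-- ===== PORT A =====
-- inner-loop body: 'if row not in matrix: matrix[row] = {}' then
-- 'matrix[row][col] = {}' immediately overwritten by 'matrix[row][col] = node_id' —
-- the transient '{}' placeholder is ported as the single insert of node_id it becomes
-- (insert overwrites in place when the key exists, appends when it does not, exactly
-- as the Python pair of statements does); node_id is st.2.
def pvRowStep (col : Int) (st : PySem.Dict Int (PySem.Dict Int Int) × Int) (row : Int) :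
    PySem.Dict Int (PySem.Dict Int Int) × Int :=
  let m := if st.1.contains row then st.1 else st.1.insert row PySem.Dict.empty
  (m.insert row ((m.getD row PySem.Dict.empty).insert col st.2), st.2 + 1)

-- 'for row in range(rows): …' for one value of col
def pvColStep (rows : Int) (st : PySem.Dict Int (PySem.Dict Int Int) × Int) (col : Int) :
    PySem.Dict Int (PySem.Dict Int Int) × Int :=
  (PySem.List.pyRange 0 rows 1).foldl (pvRowStep col) st

def get_node_id_matrix (rows : Int) (cols : Int) : List (Int × List (Int × Int)) :=
  (((PySem.List.pyRange 0 cols 1).foldl (pvColStep rows)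
      ((PySem.Dict.empty : PySem.Dict Int (PySem.Dict Int Int)), (0 : Int))).1).items.map
    (fun p => (p.1, p.2.items))

-- ===== PORT B =====
-- zip(*ls): while every list is nonempty, emit the heads and recurse on the tails
-- (hand-ported: PySem has no variadic zip; exact for zip over lists, including zip() = []).
def pvZipStar (ls : List (List Int)) : List (List Int) :=
  match ls with
  | [] => []
  | l :: rest =>
    if (l :: rest).any List.isEmpty then []
    else ((l :: rest).map (fun t => t.headD 0)) :: pvZipStar ((l :: rest).map List.tail)
termination_by (ls.headD []).length
decreasing_by
  rename_i hne
  simp only [List.any_eq_true, not_exists, not_and, Bool.not_eq_true] at hne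
  have hl : l.isEmpty = false := hne l (List.mem_cons_self)
  simp only [List.map_cons, List.headD_cons, List.length_tail]
  have : l ≠ [] := by simpa [List.isEmpty_iff] using hl
  have : 0 < l.length := List.length_pos_iff.mpr this
  omega

-- dict(enumerate(row_vals)) has fresh increasing keys, so its items are exactly
-- 'enumerate row_vals'; likewise the outer comprehension's dict over fresh keys r.
def get_node_id_matrix_alt (rows : Int) (cols : Int) : List (Int × List (Int × Int)) :=
  if rows ≤ 0 ∨ cols ≤ 0 then []
  else
    (PySem.List.enumerate (pvZipStar ((PySem.List.pyRange 0 cols 1).map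
        (fun c => PySem.List.slice (PySem.List.pyRange 0 (rows * cols) 1)
          (some (c * rows)) (some ((c + 1) * rows))))) 0).map
      (fun p => (p.1, PySem.List.enumerate p.2 0))

-- ===== PRECONDITION & SPEC =====
def Spec_get_node_id_matrix (rows : Int) (cols : Int) (out : List (Int × List (Int × Int))) : Prop := out = get_node_id_matrix_alt rows cols
instance (rows : Int) (cols : Int) (out : List (Int × List (Int × Int))) : Decidable (Spec_get_node_id_matrix rows cols out) := by unfold Spec_get_node_id_matrix; infer_instance

-- ===== CLAIM (what is proved, stated in full; the proofs are below) =====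
def Claim_equal_get_node_id_matrix : Prop := ∀ (rows : Int) (cols : Int), Dom_get_node_id_matrix rows cols → Spec_get_node_id_matrix rows cols (get_node_id_matrix rows cols)

-- ===== LEMMAS AND PROOFS =====

-- the common closed form both sides are reduced to (for 0 < rows, 0 < cols)
def pvM (rows cols : Int) : List (Int × List (Int × Int)) :=
  (PySem.List.pyRange 0 rows 1).map (fun row =>
    (row, (PySem.List.pyRange 0 cols 1).map (fun col => (col, col * rows + row))))

-- ---------- A-side: the fold builds pvM ----------

-- row 'row' of A's matrix after c columns have been filled
def pvRowL (rows c row : Int) : List (Int × Int) :=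
  (PySem.List.pyRange 0 c 1).map (fun col => (col, col * rows + row))

-- A's matrix items after c columns, keyed over a given list of rows
def pvInner (rows c : Int) (l : List Int) : List (Int × PySem.Dict Int Int) :=
  l.map (fun row => (row, PySem.Dict.mk (pvRowL rows c row)))

theorem pv_get?_mk_append (l1 l2 : List (Int × PySem.Dict Int Int)) (k : Int)
    (h : ∀ p ∈ l1, p.1 ≠ k) :
    (PySem.Dict.mk (l1 ++ l2)).get? k = (PySem.Dict.mk l2).get? k := by
  induction l1 with
  | nil => rfl
  | cons p t ih =>
      rw [List.cons_append, show (PySem.Dict.mk ((p.1, p.2) :: (t ++ l2))).get? k =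
        (PySem.Dict.mk (p :: (t ++ l2))).get? k from rfl] at *
      rw [PySem.Dict.get?_mk_cons]
      simp only [beq_iff_eq, if_neg (h p (List.mem_cons_self))]
      exact ih (fun q hq => h q (List.mem_cons_of_mem _ hq))

theorem pv_map_overwrite (l : List (Int × PySem.Dict Int Int)) (k : Int)
    (v : PySem.Dict Int Int) (h : ∀ p ∈ l, p.1 ≠ k) :
    l.map (fun p => if p.1 == k then (k, v) else p) = l := by
  induction l with
  | nil => rfl
  | cons p t ih =>
      rw [List.map_cons, if_neg (by simp [h p List.mem_cons_self]),
        ih (fun q hq => h q (List.mem_cons_of_mem _ hq))]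

theorem pvRowStep_fresh (c nid k : Int) (l : List (Int × PySem.Dict Int Int))
    (h : ∀ p ∈ l, p.1 ≠ k) :
    pvRowStep c (PySem.Dict.mk l, nid) k =
      (PySem.Dict.mk (l ++ [(k, PySem.Dict.mk [(c, nid)])]), nid + 1) := by
  have hcon : (PySem.Dict.mk l).contains k = false := by
    rw [PySem.Dict.contains_mk]
    simp only [List.any_eq_false, beq_iff_eq]
    exact h
  have hins : (PySem.Dict.mk l).insert k PySem.Dict.empty =
      PySem.Dict.mk (l ++ [(k, PySem.Dict.empty)]) :=
    PySem.Dict.ext (PySem.Dict.items_insert_of_not_contains _ _ hcon)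
  have hget : (PySem.Dict.mk (l ++ [(k, PySem.Dict.empty)])).get? k =
      some PySem.Dict.empty := by
    rw [pv_get?_mk_append _ _ _ h, PySem.Dict.get?_mk_cons]
    simp
  have hcon2 : (PySem.Dict.mk (l ++ [(k, PySem.Dict.empty)])).contains k = true := by
    rw [PySem.Dict.contains_eq_isSome_get?, hget]; rfl
  simp only [pvRowStep, hcon, Bool.false_eq_true, if_false, hins]
  rw [PySem.Dict.getD_of_get?_eq_some _ _ hget]
  refine Prod.ext ?_ rfl
  refine PySem.Dict.ext ?_
  rw [PySem.Dict.items_insert_of_contains _ _ hcon2]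
  show (l ++ [(k, PySem.Dict.empty)]).map _ = _
  rw [List.map_append, pv_map_overwrite _ _ _ h]
  simp only [List.map_cons, List.map_nil, beq_self_eq_true, if_true]
  rfl

theorem pvRowStep_present (c nid k : Int) (A B : List (Int × PySem.Dict Int Int))
    (d : PySem.Dict Int Int) (hA : ∀ p ∈ A, p.1 ≠ k) (hB : ∀ p ∈ B, p.1 ≠ k) :
    pvRowStep c (PySem.Dict.mk (A ++ (k, d) :: B), nid) k =
      (PySem.Dict.mk (A ++ (k, d.insert c nid) :: B), nid + 1) := by
  have hget : (PySem.Dict.mk (A ++ (k, d) :: B)).get? k = some d := by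
    rw [pv_get?_mk_append _ _ _ hA, PySem.Dict.get?_mk_cons]
    simp
  have hcon : (PySem.Dict.mk (A ++ (k, d) :: B)).contains k = true := by
    rw [PySem.Dict.contains_eq_isSome_get?, hget]; rfl
  simp only [pvRowStep, hcon, if_true]
  rw [PySem.Dict.getD_of_get?_eq_some _ _ hget]
  refine Prod.ext ?_ rfl
  refine PySem.Dict.ext ?_
  rw [PySem.Dict.items_insert_of_contains _ _ hcon]
  show (A ++ (k, d) :: B).map _ = _
  rw [List.map_append, pv_map_overwrite _ _ _ hA, List.map_cons]
  simp only [beq_self_eq_true, if_true]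
  rw [pv_map_overwrite _ _ _ hB]

-- keys of pvInner over a range are the range elements
theorem pv_mem_pvInner (rows c : Int) (l : List Int) (p : Int × PySem.Dict Int Int)
    (hp : p ∈ pvInner rows c l) : p.1 ∈ l := by
  simp only [pvInner, List.mem_map] at hp
  obtain ⟨row, hrow, hp⟩ := hp
  rw [← hp]; exact hrow

-- appending column c to one row's dict
theorem pv_rowL_succ (rows c row : Int) (hc : 0 ≤ c) :
    (PySem.Dict.mk (pvRowL rows c row)).insert c (c * rows + row) =
      PySem.Dict.mk (pvRowL rows (c + 1) row) := by
  have hcon : (PySem.Dict.mk (pvRowL rows c row)).contains c = false := by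
    rw [PySem.Dict.contains_mk]
    simp only [List.any_eq_false, beq_iff_eq]
    intro p hp
    simp only [pvRowL, List.mem_map] at hp
    obtain ⟨col, hcol, hp⟩ := hp
    rw [PySem.List.mem_pyRange_one] at hcol
    rw [← hp]
    exact ne_of_lt hcol.2
  refine PySem.Dict.ext ?_
  rw [PySem.Dict.items_insert_of_not_contains _ _ hcon]
  show pvRowL rows c row ++ _ = pvRowL rows (c + 1) row
  simp only [pvRowL]
  rw [PySem.List.pyRange_one_succ_right hc, List.map_append]
  rfl

-- first column: the inner loop builds rows 0..j-1 from the empty dict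
theorem pv_inner0 (rows : Int) (j : Nat) :
    (PySem.List.pyRange 0 (j : Int) 1).foldl (pvRowStep 0) (PySem.Dict.mk [], 0) =
      (PySem.Dict.mk (pvInner rows 1 (PySem.List.pyRange 0 (j : Int) 1)), (j : Int)) := by
  induction j with
  | zero => simp [PySem.List.pyRange_one_eq_nil (le_refl (0 : Int)), pvInner]
  | succ j ih =>
      have hsr : PySem.List.pyRange 0 ((j : Int) + 1) 1 =
          PySem.List.pyRange 0 (j : Int) 1 ++ [(j : Int)] :=
        PySem.List.pyRange_one_succ_right (by positivity)
      push_cast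
      rw [hsr, List.foldl_append, ih, List.foldl_cons, List.foldl_nil]
      rw [pvRowStep_fresh _ _ _ _ (fun p hp => by
        have := pv_mem_pvInner _ _ _ _ hp
        rw [PySem.List.mem_pyRange_one] at this
        exact ne_of_lt this.2)]
      refine Prod.ext ?_ rfl
      refine congrArg PySem.Dict.mk ?_
      simp only [pvInner, List.map_append, List.map_cons, List.map_nil]
      refine congrArg _ ?_
      have : pvRowL rows 1 (j : Int) = [(0, (j : Int))] := by
        simp [pvRowL, PySem.List.pyRange_one_cons (show (0:Int) < 1 by norm_num),
          PySem.List.pyRange_one_eq_nil (le_refl (1 : Int))]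
      rw [this]

-- later columns: the inner loop appends column c to rows 0..j-1, leaving rows j.. untouched
theorem pv_innerC (rows c : Int) (hc : 0 < c) (j : Nat) (hj : (j : Int) ≤ rows) :
    (PySem.List.pyRange 0 (j : Int) 1).foldl (pvRowStep c)
        (PySem.Dict.mk (pvInner rows c (PySem.List.pyRange 0 rows 1)), c * rows) =
      (PySem.Dict.mk (pvInner rows (c + 1) (PySem.List.pyRange 0 (j : Int) 1) ++
          pvInner rows c (PySem.List.pyRange (j : Int) rows 1)), c * rows + (j : Int)) := by
  induction j with
  | zero =>
      simp only [Nat.cast_zero, PySem.List.pyRange_one_eq_nil (le_refl (0 : Int)),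
        List.foldl_nil, pvInner, List.map_nil, List.nil_append, add_zero]
  | succ j ih =>
      have hj' : (j : Int) ≤ rows := by push_cast at hj ⊢; omega
      have hjr : (j : Int) < rows := by push_cast at hj; omega
      have hsr : PySem.List.pyRange 0 ((j : Int) + 1) 1 =
          PySem.List.pyRange 0 (j : Int) 1 ++ [(j : Int)] :=
        PySem.List.pyRange_one_succ_right (by positivity)
      have hcons : PySem.List.pyRange (j : Int) rows 1 =
          (j : Int) :: PySem.List.pyRange ((j : Int) + 1) rows 1 :=
        PySem.List.pyRange_one_cons hjr
      push_cast
      rw [hsr, List.foldl_append, ih hj', List.foldl_cons, List.foldl_nil]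
      rw [hcons]
      show pvRowStep c (PySem.Dict.mk (_ ++ ((j : Int), PySem.Dict.mk (pvRowL rows c (j : Int))) :: _), _) _ = _
      rw [pvRowStep_present c (c * rows + (j : Int)) (j : Int) _ _ _
        (fun p hp => by
          have := pv_mem_pvInner _ _ _ _ hp
          rw [PySem.List.mem_pyRange_one] at this
          exact ne_of_lt this.2)
        (fun p hp => by
          have := pv_mem_pvInner _ _ _ _ hp
          rw [PySem.List.mem_pyRange_one] at this
          omega)]
      refine Prod.ext ?_ (by show c * rows + (j : Int) + 1 = _; push_cast; ring)
      refine congrArg PySem.Dict.mk ?_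
      rw [pv_rowL_succ rows c (j : Int) (le_of_lt hc)]
      simp [pvInner, List.append_assoc]

-- A's state after the first k columns (k ≥ 1), rows ≥ 0
theorem pv_outer (rows : Int) (hr : 0 ≤ rows) (k : Nat) (hk : 0 < k) :
    (PySem.List.pyRange 0 (k : Int) 1).foldl (pvColStep rows) (PySem.Dict.mk [], 0) =
      (PySem.Dict.mk (pvInner rows (k : Int) (PySem.List.pyRange 0 rows 1)), (k : Int) * rows) := by
  induction k with
  | zero => omega
  | succ k ih =>
      by_cases hk1 : k = 0
      · subst hk1
        have h1 : PySem.List.pyRange 0 ((0 : Nat) + 1 : Nat) 1 = [(0 : Int)] := by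
          norm_num [PySem.List.pyRange_one_cons (show (0:Int) < 1 by norm_num),
            PySem.List.pyRange_one_eq_nil (le_refl (1 : Int))]
        rw [h1, List.foldl_cons, List.foldl_nil]
        show pvColStep rows (PySem.Dict.mk [], 0) 0 = _
        simp only [pvColStep]
        have hrows : rows = ((rows.toNat : Nat) : Int) := (Int.toNat_of_nonneg hr).symm
        have h0 := pv_inner0 rows rows.toNat
        rw [← hrows] at h0
        rw [h0]
        norm_num
      · have hk' : 0 < k := Nat.pos_of_ne_zero hk1
        have hsr : PySem.List.pyRange 0 ((k : Int) + 1) 1 =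
            PySem.List.pyRange 0 (k : Int) 1 ++ [(k : Int)] :=
          PySem.List.pyRange_one_succ_right (by positivity)
        push_cast
        rw [hsr, List.foldl_append, ih hk', List.foldl_cons, List.foldl_nil]
        show pvColStep rows _ _ = _
        simp only [pvColStep]
        have hrows : rows = ((rows.toNat : Nat) : Int) := (Int.toNat_of_nonneg hr).symm
        have hc : (0 : Int) < (k : Int) := by exact_mod_cast hk'
        have h1 := pv_innerC rows (k : Int) hc rows.toNat (by rw [← hrows])
        rw [← hrows] at h1
        rw [h1, PySem.List.pyRange_one_eq_nil (le_refl rows)]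
        simp only [pvInner, List.map_nil, List.append_nil]
        refine Prod.ext rfl ?_
        show _ = ((k : Int) + 1) * _
        ring

-- A equals the closed form (or []) by case on the signs
theorem pvA_char_nonpos (rows cols : Int) (h : cols ≤ 0 ∨ rows ≤ 0) :
    get_node_id_matrix rows cols = [] := by
  rcases h with hc | hr
  · simp [get_node_id_matrix, PySem.List.pyRange_one_eq_nil hc, PySem.Dict.empty]
  · have hnil : PySem.List.pyRange 0 rows 1 = [] := PySem.List.pyRange_one_eq_nil hr
    simp only [get_node_id_matrix]
    rw [PySem.List.foldl_congr_mem _ _ (fun acc _ => acc) _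
      (fun acc x _ => by simp [pvColStep, hnil]), PySem.List.foldl_ignore]
    rfl

theorem pvA_char_pos (rows cols : Int) (hr : 0 < rows) (hc : 0 < cols) :
    get_node_id_matrix rows cols = pvM rows cols := by
  have hcols : cols = ((cols.toNat : Nat) : Int) := (Int.toNat_of_nonneg (le_of_lt hc)).symm
  have hkpos : 0 < cols.toNat := by omega
  simp only [get_node_id_matrix]
  rw [show (PySem.Dict.empty : PySem.Dict Int (PySem.Dict Int Int)) = PySem.Dict.mk [] from rfl]
  rw [hcols, pv_outer rows (le_of_lt hr) cols.toNat hkpos]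
  show (pvInner rows _ _).map _ = _
  simp only [pvInner, pvRowL, pvM, List.map_map]
  rfl

-- ---------- B-side: slices, transpose, enumerate ----------

-- a slice of the flat id range is the corresponding sub-range
theorem pv_slice_range (a b n : Nat) (hab : a ≤ b) (hbn : b ≤ n) :
    PySem.List.slice (PySem.List.pyRange 0 (n : Int) 1) (some (a : Int)) (some (b : Int)) =
      PySem.List.pyRange (a : Int) (b : Int) 1 := by
  rw [PySem.List.slice_natCast]
  have hsplit : PySem.List.pyRange 0 (n : Int) 1 =
      PySem.List.pyRange 0 (a : Int) 1 ++
        (PySem.List.pyRange (a : Int) (b : Int) 1 ++ PySem.List.pyRange (b : Int) (n : Int) 1) := by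
    rw [← PySem.List.pyRange_one_append (a : Int) (b : Int) (n : Int) (by exact_mod_cast hab) (by exact_mod_cast hbn)]
    exact PySem.List.pyRange_one_append 0 (a : Int) (n : Int) (by positivity) (by exact_mod_cast le_trans hab hbn)
  rw [hsplit, List.drop_append_of_le_length (by simp [PySem.List.length_pyRange_one]),
    List.drop_of_length_le (by simp [PySem.List.length_pyRange_one])]
  rw [List.nil_append, List.take_append_of_le_length (by simp [PySem.List.length_pyRange_one])]
  rw [List.take_of_length_le (by simp [PySem.List.length_pyRange_one])]

-- pvZipStar transposes a nonempty list of equal-length lists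
theorem pvZipStar_transpose (n : Nat) : ∀ (L : List (List Int)), L ≠ [] →
    (∀ l ∈ L, l.length = n) →
    pvZipStar L = (List.range n).map (fun r => L.map (fun l => l.getD r 0)) := by
  induction n with
  | zero =>
      intro L hne hlen
      match L with
      | l :: rest =>
        have hl : l.isEmpty = true := by
          simpa [List.isEmpty_iff, List.length_eq_zero_iff] using hlen l (List.mem_cons_self)
        rw [pvZipStar, if_pos (by simp [hl])]
        simp
  | succ n ih =>
      intro L hne hlen
      match L with
      | l :: rest =>
        have hnonempty : ∀ t ∈ (l :: rest), t ≠ [] := by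
          intro t ht h0
          have := hlen t ht
          rw [h0] at this
          simp at this
        have hany : ((l :: rest).any List.isEmpty) = false := by
          simp only [List.any_eq_false]
          intro t ht
          simpa [List.isEmpty_iff] using hnonempty t ht
        rw [pvZipStar, if_neg (by simp [hany])]
        have htne : ((l :: rest).map List.tail) ≠ [] := by simp
        have htlen : ∀ t ∈ (l :: rest).map List.tail, t.length = n := by
          intro t ht
          rw [List.mem_map] at ht
          obtain ⟨u, hu, rfl⟩ := ht
          have := hlen u hu
          simp [List.length_tail, this]
        rw [ih _ htne htlen, List.range_succ_eq_map]
        conv_rhs => rw [List.map_cons, List.map_map]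
        congr 1
        · refine (List.map_congr_left (fun t ht => ?_))
          obtain ⟨x, xs, rfl⟩ := List.exists_cons_of_ne_nil (hnonempty t ht)
          simp
        · refine List.map_congr_left (fun r _ => ?_)
          simp only [Function.comp, List.map_map]
          refine List.map_congr_left (fun t ht => ?_)
          obtain ⟨x, xs, rfl⟩ := List.exists_cons_of_ne_nil (hnonempty t ht)
          simp

-- enumerate over a mapped range pairs each index with its image
theorem pv_enumerate_map_range {α : Type} (f : Nat → α) (m : Nat) :
    PySem.List.enumerate ((List.range m).map f) 0 =
      (List.range m).map (fun k => (((k : Nat) : Int), f k)) := by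
  induction m with
  | zero => simp [PySem.List.enumerate_nil]
  | succ m ih =>
      rw [List.range_succ]
      simp only [List.map_append, PySem.List.enumerate_append, ih, List.map_cons,
        List.map_nil, PySem.List.enumerate_cons, PySem.List.enumerate_nil,
        List.length_map, List.length_range]
      simp

-- B equals [] when either dimension is nonpositive
theorem pvB_char_nonpos (rows cols : Int) (h : cols ≤ 0 ∨ rows ≤ 0) :
    get_node_id_matrix_alt rows cols = [] := by
  rw [get_node_id_matrix_alt, if_pos (Or.symm h)]

theorem pvB_char_pos (rows cols : Int) (hr : 0 < rows) (hc : 0 < cols) :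
    get_node_id_matrix_alt rows cols = pvM rows cols := by
  have hrows : rows = ((rows.toNat : Nat) : Int) := (Int.toNat_of_nonneg (le_of_lt hr)).symm
  have hcols : cols = ((cols.toNat : Nat) : Int) := (Int.toNat_of_nonneg (le_of_lt hc)).symm
  rw [get_node_id_matrix_alt, if_neg (by simp only [not_or, not_le]; exact ⟨hr, hc⟩)]

  -- the columns are the consecutive sub-ranges, each of length rows.toNat
  have hcol : ∀ c ∈ PySem.List.pyRange 0 cols 1,
      PySem.List.slice (PySem.List.pyRange 0 (rows * cols) 1)
          (some (c * rows)) (some ((c + 1) * rows)) =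
        PySem.List.pyRange (c * rows) ((c + 1) * rows) 1 := by
    intro c hcmem
    rw [PySem.List.mem_pyRange_one] at hcmem
    have e1 : (0 : Int) ≤ c * rows := mul_nonneg hcmem.1 hr.le
    have e2 : c * rows ≤ (c + 1) * rows := by nlinarith
    have e3 : (c + 1) * rows ≤ rows * cols := by nlinarith
    have h1 : c * rows = (((c * rows).toNat : Nat) : Int) := (Int.toNat_of_nonneg e1).symm
    have h2 : (c + 1) * rows = ((((c + 1) * rows).toNat : Nat) : Int) :=
      (Int.toNat_of_nonneg (le_trans e1 e2)).symm
    have h3 : rows * cols = (((rows * cols).toNat : Nat) : Int) :=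
      (Int.toNat_of_nonneg (le_trans (le_trans e1 e2) e3)).symm
    rw [h1, h2, h3]
    exact pv_slice_range _ _ _ (Int.toNat_le_toNat e2) (Int.toNat_le_toNat e3)
  rw [List.map_congr_left hcol]
  -- transpose the columns
  have hlen : ∀ l ∈ (PySem.List.pyRange 0 cols 1).map
      (fun c => PySem.List.pyRange (c * rows) ((c + 1) * rows) 1), l.length = rows.toNat := by
    intro l hl
    rw [List.mem_map] at hl
    obtain ⟨c, _, rfl⟩ := hl
    rw [PySem.List.length_pyRange_one]
    congr 1
    ring
  have hLne : (PySem.List.pyRange 0 cols 1).map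
      (fun c => PySem.List.pyRange (c * rows) ((c + 1) * rows) 1) ≠ [] := by
    rw [PySem.List.pyRange_one_cons hc]
    simp
  rw [pvZipStar_transpose rows.toNat _ hLne hlen]
  -- each transposed row r is the list of ids c*rows + r
  have hrow : ∀ r ∈ List.range rows.toNat,
      ((PySem.List.pyRange 0 cols 1).map
          (fun c => PySem.List.pyRange (c * rows) ((c + 1) * rows) 1)).map
        (fun l => l.getD r 0) =
      (PySem.List.pyRange 0 cols 1).map (fun c => c * rows + (r : Int)) := by
    intro r hr'
    rw [List.mem_range] at hr'
    rw [List.map_map]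
    refine List.map_congr_left (fun c _ => ?_)
    have hlt : r < (PySem.List.pyRange (c * rows) ((c + 1) * rows) 1).length := by
      rw [PySem.List.length_pyRange_one]
      have : (c + 1) * rows - c * rows = rows := by ring
      rw [this]
      omega
    simp only [Function.comp]
    rw [List.getD_eq_getElem _ _ hlt, PySem.List.getElem_pyRange_one]
  rw [List.map_congr_left hrow]
  -- assemble: outer and inner enumerates
  rw [pv_enumerate_map_range, List.map_map]
  simp only [pvM]
  rw [show PySem.List.pyRange 0 rows 1 = (List.range rows.toNat).map (fun k => ((k : Nat) : Int))
    from PySem.List.pyRange_zero rows, List.map_map]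
  refine List.map_congr_left (fun r _ => ?_)
  simp only [Function.comp_apply]
  congr 1
  rw [show PySem.List.pyRange 0 cols 1 = (List.range cols.toNat).map (fun k => ((k : Nat) : Int))
    from PySem.List.pyRange_zero cols, List.map_map, pv_enumerate_map_range, List.map_map]
  rfl

theorem get_node_id_matrix_eq_alt (rows cols : Int) :
    get_node_id_matrix rows cols = get_node_id_matrix_alt rows cols := by
  by_cases hc : cols ≤ 0
  · rw [pvA_char_nonpos rows cols (Or.inl hc), pvB_char_nonpos rows cols (Or.inl hc)]
  · by_cases hr : rows ≤ 0
    · rw [pvA_char_nonpos rows cols (Or.inr hr), pvB_char_nonpos rows cols (Or.inr hr)]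
    · rw [not_le] at hc hr
      rw [pvA_char_pos rows cols hr hc, pvB_char_pos rows cols hr hc]

-- ===== VERDICT (by name: the statement is the Claim_ definition above) =====
theorem get_node_id_matrix_spec : Claim_equal_get_node_id_matrix := by
  intro rows cols _
  exact get_node_id_matrix_eq_alt rows cols
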